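-- pv_equiv track=rewrite | github.com/aymak91/HackerRankSolutions | 2023-02-13/malarkey_sort.py | malarkey_sort
-- ===== SOURCE A (Python) =====
-- def malarkey_sort(arr):
--     ans = list()
--     arr.sort()
--     l, r = 0, len(arr)-1
--     flip = False
--
--     while l <= r:
--         if flip:
--             ans.append(arr[l])
--             l += 1
--             flip = not flip
--         else:
--             ans.append(arr[r])
--             r -= 1
--             flip = not flip
--
--     return ans
-- ===== SOURCE B (Python) =====
-- def malarkey_sort(arr):
--     arr.sort()  # same in-place sort as A; equivalence is about the return value and this mutation matches
--     flat = [x for pair in zip(reversed(arr), arr) for x in pair]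
--     return flat[:len(arr)]
-- ===== Notes on version B (the rewrite author's own statement) =====
-- stated objective: simpler
-- what changed: Replaces the stateful two-pointer + flip-flag while loop with a zip of the reversed and forward sorted list, flattened and truncated to len(arr).
import Mathlib
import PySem

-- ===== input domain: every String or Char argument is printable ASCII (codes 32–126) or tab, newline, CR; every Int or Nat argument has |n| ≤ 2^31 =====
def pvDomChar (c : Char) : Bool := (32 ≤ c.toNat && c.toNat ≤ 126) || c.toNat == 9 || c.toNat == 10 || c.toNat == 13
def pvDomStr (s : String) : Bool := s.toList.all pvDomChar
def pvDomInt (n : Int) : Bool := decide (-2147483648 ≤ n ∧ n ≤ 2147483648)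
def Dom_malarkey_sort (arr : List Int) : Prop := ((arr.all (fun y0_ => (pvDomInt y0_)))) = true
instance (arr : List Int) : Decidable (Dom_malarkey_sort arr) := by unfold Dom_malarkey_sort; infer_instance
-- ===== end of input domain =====

-- B replaces A's two-pointer + flip-flag while loop by zipping the reversed sorted list with
-- the forward sorted list, flattening and truncating (objective: simpler).
-- Both Pythons sort `arr` in place; the equivalence proved here is about the return value
-- (the in-place mutation is identical in A and B anyway).

-- ===== PORT A =====
-- the while loop: state (l, r, flip); indices are always in range in reachable states
-- (0 ≤ l ≤ r < len), so the `.getD 0` default of pyGet? is never taken where the loop runs.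
def malarkey_sort_loop (arr : List Int) (l r : Int) (flip : Bool) : List Int :=
  if _h : l ≤ r then
    if flip then
      ((PySem.List.pyGet? arr l).getD 0) :: malarkey_sort_loop arr (l + 1) r (!flip)
    else
      ((PySem.List.pyGet? arr r).getD 0) :: malarkey_sort_loop arr l (r - 1) (!flip)
  else []
termination_by (r - l + 1).toNat
decreasing_by all_goals omega

def malarkey_sort (arr : List Int) : List Int :=
  let arr' := PySem.List.sorted arr (fun x => x) false   -- arr.sort()
  malarkey_sort_loop arr' 0 ((arr'.length : Int) - 1) false

-- ===== PORT B =====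
def malarkey_sort_alt (arr : List Int) : List Int :=
  let a := PySem.List.sorted arr (fun x => x) false      -- arr.sort()
  (((a.reverse.zip a).flatMap (fun p => [p.1, p.2]))).take a.length

-- ===== PRECONDITION & SPEC =====
def Spec_malarkey_sort (arr : List Int) (out : List Int) : Prop := out = malarkey_sort_alt arr
instance (arr : List Int) (out : List Int) : Decidable (Spec_malarkey_sort arr out) := by unfold Spec_malarkey_sort; infer_instance

-- ===== CLAIM (what is proved, stated in full; the proofs are below) =====
def Claim_equal_malarkey_sort : Prop := ∀ (arr : List Int), Dom_malarkey_sort arr → Spec_malarkey_sort arr (malarkey_sort arr)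

-- ===== LEMMAS AND PROOFS =====

-- B's core computation on an arbitrary list
def interleaveEnds (t : List Int) : List Int :=
  ((t.reverse.zip t).flatMap (fun p => [p.1, p.2])).take t.length

lemma length_flatMap_pair (l : List (Int × Int)) :
    (l.flatMap (fun p => [p.1, p.2])).length = 2 * l.length := by
  induction l with
  | nil => simp
  | cons x xs ih => simp [List.flatMap_cons, ih]; omega

lemma interleaveEnds_nil : interleaveEnds [] = [] := rfl

lemma interleaveEnds_single (a : Int) : interleaveEnds [a] = [a] := rfl

lemma interleaveEnds_step (a b : Int) (m : List Int) :
    interleaveEnds (a :: (m ++ [b])) = b :: a :: interleaveEnds m := by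
  unfold interleaveEnds
  have hrev : (a :: (m ++ [b])).reverse = b :: (m.reverse ++ [a]) := by simp
  rw [hrev]
  have hzip : (b :: (m.reverse ++ [a])).zip (a :: (m ++ [b]))
      = (b, a) :: ((m.reverse.zip m) ++ [(a, b)]) := by
    simp [List.zip_append (by simp : m.reverse.length = m.length)]
  rw [hzip]
  simp only [List.flatMap_cons, List.flatMap_append, List.length_cons, List.length_append]
  have hlen : m.length ≤ ((m.reverse.zip m).flatMap (fun p : Int × Int => [p.1, p.2])).length := by
    rw [length_flatMap_pair, List.length_zip, List.length_reverse]; omega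
  simp [List.take_append_of_le_length hlen]

lemma loop_eq_interleave : ∀ (n : Nat) (s : List Int) (l r : Nat),
    l + n = r + 1 → r < s.length →
    malarkey_sort_loop s (l : Int) (r : Int) false = interleaveEnds ((s.drop l).take n) := by
  intro n
  induction n using Nat.strong_induction_on with
  | _ n ih =>
    intro s l r hln hr
    match n, hln with
    | 0, hln =>
      -- l = r + 1 : loop exits immediately
      rw [malarkey_sort_loop]
      rw [dif_neg (by omega)]
      simp [interleaveEnds_nil]
    | 1, hln =>
      -- l = r : one element
      have hl : l = r := by omega
      subst hl
      have hget : PySem.List.pyGet? s (l : Int) = some s[l] :=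
        PySem.List.pyGet?_ofNat s l (by omega)
      rw [malarkey_sort_loop]
      rw [dif_pos (by omega)]
      simp only [Bool.false_eq_true, if_false, hget, Option.getD_some]
      rw [malarkey_sort_loop]
      rw [dif_neg (by omega)]
      have hdrop : (s.drop l).take 1 = [s[l]] := by
        rw [List.drop_eq_getElem_cons (by omega)]; rfl
      rw [hdrop, interleaveEnds_single]
    | (m + 2), hln =>
      have hlr : l + 1 ≤ r := by omega
      have hls : l < s.length := by omega
      have hgr : PySem.List.pyGet? s (r : Int) = some s[r] :=
        PySem.List.pyGet?_ofNat s r (by omega)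
      have hgl : PySem.List.pyGet? s (l : Int) = some s[l] :=
        PySem.List.pyGet?_ofNat s l (by omega)
      -- unfold two loop iterations
      rw [malarkey_sort_loop]
      rw [dif_pos (by exact_mod_cast Nat.le_of_lt_succ (by omega))]
      simp only [Bool.false_eq_true, if_false, hgr, Option.getD_some, Bool.not_false]
      rw [malarkey_sort_loop]
      rw [dif_pos (by omega : (l : Int) ≤ (r : Int) - 1)]
      simp only [if_true, hgl, Option.getD_some, Bool.not_true]
      have hcast1 : (l : Int) + 1 = ((l + 1 : Nat) : Int) := by push_cast; ring
      have hcast2 : (r : Int) - 1 = ((r - 1 : Nat) : Int) := by omega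
      rw [hcast1, hcast2]
      rw [ih m (by omega) s (l + 1) (r - 1) (by omega) (by omega)]
      -- now the segment identity
      have hmlen : m < (s.drop (l + 1)).length := by
        rw [List.length_drop]; omega
      have hseg : (s.drop l).take (m + 2)
          = s[l] :: (((s.drop (l + 1)).take m) ++ [s[r]]) := by
        have h1 : s.drop l = s[l] :: s.drop (l + 1) :=
          List.drop_eq_getElem_cons hls
        rw [h1, List.take_succ_cons]
        congr 1
        rw [List.take_add_one]
        congr 1
        have : (s.drop (l + 1))[m]? = some (s.drop (l + 1))[m] := List.getElem?_eq_getElem hmlen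
        rw [this]
        have : (s.drop (l + 1))[m] = s[l + 1 + m] := by
          rw [List.getElem_drop]
        simp [this]
        congr 1
        omega
      rw [hseg, interleaveEnds_step]

lemma malarkey_sort_eq_alt (arr : List Int) : malarkey_sort arr = malarkey_sort_alt arr := by
  unfold malarkey_sort malarkey_sort_alt
  set a := PySem.List.sorted arr (fun x => x) false with ha
  show malarkey_sort_loop a 0 ((a.length : Int) - 1) false = interleaveEnds a
  cases hn : a.length with
  | zero =>
    have : a = [] := List.eq_nil_of_length_eq_zero hn
    rw [this]
    rw [malarkey_sort_loop]
    rw [dif_neg (by norm_num)]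
    rfl
  | succ k =>
    have h0 : ((0 : Nat) : Int) = (0 : Int) := rfl
    have hc : (((k + 1 : Nat) : Int) - 1) = ((k : Nat) : Int) := by push_cast; ring
    rw [hc, ← h0]
    rw [loop_eq_interleave (k + 1) a 0 k (by omega) (by omega)]
    congr 1
    rw [List.drop_zero, List.take_of_length_le (by omega)]

-- ===== VERDICT (by name: the statement is the Claim_ definition above) =====
theorem malarkey_sort_spec : Claim_equal_malarkey_sort := by
  intro arr _
  exact malarkey_sort_eq_alt arr
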